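-- pv_equiv track=rewrite | github.com/open-compass/opencompass | opencompass/datasets/TheoremQA/legacy.py | TheoremQA_postprocess_v2
-- ===== SOURCE A (Python) =====
-- def TheoremQA_postprocess_v2(text: str) -> str:
--     prediction = text.strip().strip('\n').split('\n')[-1]
--     tmp = ''
--     for entry in prediction.split(' ')[::-1]:
--         if entry == 'is' or entry == 'be' or entry == 'are' or entry.endswith(
--                 ':'):
--             break
--         tmp = entry + ' ' + tmp
--     prediction = tmp.strip().strip('.')
--     return prediction
-- ===== SOURCE B (Python) =====
-- def TheoremQA_postprocess_v2(text: str) -> str: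
--     words = text.strip().split('\n')[-1].split(' ')
--     cut = 0
--     for i, w in enumerate(words):
--         if w in ('is', 'be', 'are') or w.endswith(':'):
--             cut = i + 1
--     return ' '.join(words[cut:]).strip().strip('.')
-- ===== Notes on version B (the rewrite author's own statement) =====
-- stated objective: simpler
-- what changed: Replaces the backward token-by-token string accumulation with early break by a single forward enumerate pass computing the cut index after the last boundary word, then one slice/join; also drops the redundant second strip of newline characters after the full strip.
import Mathlib
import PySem

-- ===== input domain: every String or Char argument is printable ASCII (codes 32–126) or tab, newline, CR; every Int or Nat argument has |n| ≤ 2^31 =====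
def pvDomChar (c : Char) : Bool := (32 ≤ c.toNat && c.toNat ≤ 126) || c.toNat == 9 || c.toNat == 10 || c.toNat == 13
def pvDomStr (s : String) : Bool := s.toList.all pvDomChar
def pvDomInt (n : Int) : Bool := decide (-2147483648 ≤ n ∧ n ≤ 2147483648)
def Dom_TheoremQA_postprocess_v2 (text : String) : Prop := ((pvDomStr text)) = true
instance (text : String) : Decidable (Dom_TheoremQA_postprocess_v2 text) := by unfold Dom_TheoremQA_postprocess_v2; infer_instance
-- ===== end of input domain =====

-- B replaces A's backward accumulation-with-break by one forward pass computing a cut index, then a slice/join (objective: simpler).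

-- ===== PORT A =====
-- the "for entry in …[::-1]: if <boundary>: break; tmp = entry + ' ' + tmp" loop
def pvLoopA : List (List Char) → List Char → List Char
  | [], tmp => tmp
  | e :: rest, tmp =>
    if e = ['i','s'] ∨ e = ['b','e'] ∨ e = ['a','r','e'] ∨ PySem.Chars.endswith e [':'] = true then tmp
    else pvLoopA rest (e ++ [' '] ++ tmp)

def TheoremQA_postprocess_v2 (text : String) : String :=
  -- text.strip().strip('\n').split('\n')[-1]; split('\n') always returns a nonempty list so [-1] never raises
  let prediction : List Char :=
    (PySem.List.pyGet? (PySem.Chars.splitOn (PySem.Chars.stripChars (PySem.Chars.strip text.toList) ['\n']) ['\n']) (-1)).getD []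
  let tmp := pvLoopA (PySem.Chars.splitOn prediction [' ']).reverse []  -- split(' ')[::-1]
  String.ofList (PySem.Chars.stripChars (PySem.Chars.strip tmp) ['.'])

-- ===== PORT B =====
def TheoremQA_postprocess_v2_alt (text : String) : String :=
  -- text.strip().split('\n')[-1].split(' '); split('\n') is never empty so [-1] never raises
  let words : List (List Char) :=
    PySem.Chars.splitOn ((PySem.List.pyGet? (PySem.Chars.splitOn (PySem.Chars.strip text.toList) ['\n']) (-1)).getD []) [' ']
  -- forward pass: cut = i + 1 at every boundary word
  let cut : Int := (PySem.List.enumerate words 0).foldl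
    (fun c p => if [['i','s'], ['b','e'], ['a','r','e']].contains p.2 || PySem.Chars.endswith p.2 [':'] then p.1 + 1 else c) 0
  String.ofList (PySem.Chars.stripChars (PySem.Chars.strip
    (PySem.Chars.join [' '] (PySem.List.slice words (some cut) none))) ['.'])

-- ===== PRECONDITION & SPEC =====
def Spec_TheoremQA_postprocess_v2 (text : String) (out : String) : Prop := out = TheoremQA_postprocess_v2_alt text
instance (text : String) (out : String) : Decidable (Spec_TheoremQA_postprocess_v2 text out) := by unfold Spec_TheoremQA_postprocess_v2; infer_instance

-- ===== CLAIM (what is proved, stated in full; the proofs are below) =====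
def Claim_equal_TheoremQA_postprocess_v2 : Prop := ∀ (text : String), Dom_TheoremQA_postprocess_v2 text → Spec_TheoremQA_postprocess_v2 text (TheoremQA_postprocess_v2 text)

-- ===== LEMMAS AND PROOFS =====

-- the boundary test, as one Bool (proof-side name)
def pvBd (w : List Char) : Bool :=
  [['i','s'], ['b','e'], ['a','r','e']].contains w || PySem.Chars.endswith w [':']

theorem pvBd_iff (e : List Char) :
    pvBd e = true ↔ (e = ['i','s'] ∨ e = ['b','e'] ∨ e = ['a','r','e'] ∨ PySem.Chars.endswith e [':'] = true) := by
  simp [pvBd, List.contains_cons]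
  tauto

theorem pvDropWhile_head_false {q : Char → Bool} {l : List Char} {c : Char}
    (h : (l.dropWhile q).head? = some c) : q c = false := by
  induction l with
  | nil => simp at h
  | cons a t ih =>
    by_cases hq : q a
    · simpa [hq] using ih (by simpa [hq] using h)
    · simp [hq] at h
      simpa [← h] using hq

theorem pvDropWhile_eq_self {q : Char → Bool} {l : List Char}
    (h : ∀ c, l.head? = some c → q c = false) : l.dropWhile q = l := by
  cases l with
  | nil => rfl
  | cons a t => simp [h a rfl]

-- .strip('\n') after .strip() is a no-op
theorem pvStripChars_newline (s : List Char) :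
    PySem.Chars.stripChars (PySem.Chars.strip s) ['\n'] = PySem.Chars.strip s := by
  unfold PySem.Chars.stripChars
  have hsub : ∀ (u : List Char) c, u.head? = some c → PySem.Chars.isspace c = false →
      (['\n'].contains c) = false := by
    intro u c _ hc
    simp only [List.contains_cons, List.contains_nil, Bool.or_false]
    by_contra hb
    simp at hb
    subst hb
    simp [PySem.Chars.isspace] at hc
  have h1 : ∀ c, (PySem.Chars.strip s).head? = some c → PySem.Chars.isspace c = false := by
    intro c hc
    have hpre : (PySem.Chars.strip s) <+: PySem.Chars.lstrip s := by
      unfold PySem.Chars.strip PySem.Chars.rstrip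
      simpa using (List.dropWhile_suffix (l := (PySem.Chars.lstrip s).reverse) PySem.Chars.isspace).reverse
    obtain ⟨t, ht⟩ := hpre
    have hh : (PySem.Chars.lstrip s).head? = some c := by
      rw [← ht]
      cases hs : PySem.Chars.strip s with
      | nil => simp [hs] at hc
      | cons x xs => simp [hs] at hc ⊢; simpa [hc] using hc ▸ rfl
    exact pvDropWhile_head_false hh
  have h2 : ∀ c, (PySem.Chars.strip s).reverse.head? = some c → PySem.Chars.isspace c = false := by
    intro c hc
    unfold PySem.Chars.strip PySem.Chars.rstrip at hc
    rw [List.reverse_reverse] at hc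
    exact pvDropWhile_head_false hc
  show (List.dropWhile (fun c => List.contains ['\n'] c)
      (List.dropWhile (fun c => List.contains ['\n'] c) (PySem.Chars.strip s)).reverse).reverse
      = PySem.Chars.strip s
  rw [pvDropWhile_eq_self (fun c hc => hsub _ c hc (h1 c hc))]
  rw [pvDropWhile_eq_self (fun c hc => hsub _ c hc (h2 c hc))]
  exact (PySem.Chars.strip s).reverse_reverse

-- A's loop returns the (reversed-input) maximal non-boundary prefix, i.e. the non-boundary suffix, each word with a trailing space
theorem pvLoopA_eq (l : List (List Char)) (acc : List Char) :
    pvLoopA l acc = ((l.takeWhile (fun w => !pvBd w)).reverse.map (· ++ [' '])).flatten ++ acc := by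
  induction l generalizing acc with
  | nil => simp [pvLoopA]
  | cons e rest ih =>
    by_cases hb : pvBd e = true
    · rw [pvLoopA]
      simp [if_pos ((pvBd_iff e).mp hb), List.takeWhile_cons, hb]
    · rw [pvLoopA, if_neg (fun h => hb ((pvBd_iff e).mpr h))]
      simp [List.takeWhile_cons, hb, ih]

-- B's fold computes length minus the non-boundary suffix length
theorem pvFold_eq (ws : List (List Char)) :
    (PySem.List.enumerate ws 0).foldl
        (fun c p => if [['i','s'], ['b','e'], ['a','r','e']].contains p.2 || PySem.Chars.endswith p.2 [':'] then p.1 + 1 else c) 0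
      = ((ws.length - (ws.reverse.takeWhile (fun w => !pvBd w)).length : Nat) : Int) := by
  induction ws using List.reverseRecOn with
  | nil => simp [PySem.List.enumerate]
  | append_singleton ws w ih =>
    rw [PySem.List.enumerate_append, List.foldl_append]
    by_cases hb : pvBd w = true
    · simp only [PySem.List.enumerate, List.foldl_cons, List.foldl_nil]
      rw [show ([['i','s'], ['b','e'], ['a','r','e']].contains w || PySem.Chars.endswith w [':']) = pvBd w from rfl, hb]
      simp [hb]
    · simp only [PySem.List.enumerate, List.foldl_cons, List.foldl_nil]
      rw [show ([['i','s'], ['b','e'], ['a','r','e']].contains w || PySem.Chars.endswith w [':']) = pvBd w from rfl, eq_false_of_ne_true hb]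
      simp only [Bool.false_eq_true, if_false]
      rw [ih]
      have hle : (ws.reverse.takeWhile (fun w => !pvBd w)).length ≤ ws.length := by
        simpa using List.IsPrefix.length_le (List.takeWhile_prefix (l := ws.reverse) (fun w => !pvBd w))
      have h1 : ws.length + 1 - ((ws.reverse.takeWhile (fun w => !pvBd w)).length + 1)
          = ws.length - (ws.reverse.takeWhile (fun w => !pvBd w)).length := by omega
      simp [List.takeWhile_cons, hb, h1]

theorem pvDrop_eq_suffix (ws : List (List Char)) :
    ws.drop (ws.length - (ws.reverse.takeWhile (fun w => !pvBd w)).length)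
      = (ws.reverse.takeWhile (fun w => !pvBd w)).reverse := by
  set p := fun w : List Char => !pvBd w with hp
  have hsplit : ws = (ws.reverse.dropWhile p).reverse ++ (ws.reverse.takeWhile p).reverse := by
    rw [← List.reverse_append, List.takeWhile_append_dropWhile, List.reverse_reverse]
  have hlen : (ws.reverse.dropWhile p).length = ws.length - (ws.reverse.takeWhile p).length := by
    have := congrArg List.length hsplit
    simp at this
    omega
  calc ws.drop (ws.length - (ws.reverse.takeWhile p).length)
      = ((ws.reverse.dropWhile p).reverse ++ (ws.reverse.takeWhile p).reverse).drop (ws.length - (ws.reverse.takeWhile p).length) := by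
        rw [← hsplit]
    _ = (ws.reverse.takeWhile p).reverse := List.drop_left' (by simp [hlen])

theorem pvRstrip_space (u : List Char) :
    PySem.Chars.rstrip (u ++ [' ']) = PySem.Chars.rstrip u := by
  unfold PySem.Chars.rstrip
  simp [List.dropWhile_cons, show PySem.Chars.isspace ' ' = true from rfl]

theorem pvStrip_space (u : List Char) :
    PySem.Chars.strip (u ++ [' ']) = PySem.Chars.strip u := by
  unfold PySem.Chars.strip PySem.Chars.lstrip
  rw [List.dropWhile_append]
  by_cases h : (u.dropWhile PySem.Chars.isspace).isEmpty
  · rw [if_pos h]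
    rw [List.isEmpty_iff] at h
    rw [h]
    simp [List.dropWhile_cons, show PySem.Chars.isspace ' ' = true from rfl, PySem.Chars.rstrip]
  · rw [if_neg h, pvRstrip_space]

-- words-each-with-a-trailing-space, stripped, equals the ' '-join, stripped
theorem pvFlatten_eq_join (xs : List (List Char)) :
    PySem.Chars.strip ((xs.map (· ++ [' '])).flatten) = PySem.Chars.strip (PySem.Chars.join [' '] xs) := by
  cases xs with
  | nil => rfl
  | cons a t =>
    have key : ∀ (a : List Char) (t : List (List Char)),
        (((a :: t).map (· ++ [' '])).flatten) = PySem.Chars.join [' '] (a :: t) ++ [' '] := by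
      intro a t
      induction t generalizing a with
      | nil => simp [PySem.Chars.join, List.intercalate]
      | cons b t ih =>
        simp only [List.map_cons, List.flatten_cons] at ih ⊢
        rw [ih b]
        simp [PySem.Chars.join, List.intercalate]
    rw [key, pvStrip_space]

theorem pvMain (ws : List (List Char)) :
    PySem.Chars.stripChars (PySem.Chars.strip (pvLoopA ws.reverse [])) ['.']
      = PySem.Chars.stripChars (PySem.Chars.strip (PySem.Chars.join [' ']
          (PySem.List.slice ws (some ((PySem.List.enumerate ws 0).foldl
            (fun c p => if [['i','s'], ['b','e'], ['a','r','e']].contains p.2 || PySem.Chars.endswith p.2 [':'] then p.1 + 1 else c) 0)) none))) ['.'] := by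
  rw [pvLoopA_eq, List.append_nil, pvFold_eq, PySem.List.slice_from_natCast, pvDrop_eq_suffix, pvFlatten_eq_join]

-- ===== VERDICT (by name: the statement is the Claim_ definition above) =====
theorem TheoremQA_postprocess_v2_spec : Claim_equal_TheoremQA_postprocess_v2 := by
  intro text _
  unfold Spec_TheoremQA_postprocess_v2
  simp only [TheoremQA_postprocess_v2, TheoremQA_postprocess_v2_alt]
  rw [pvStripChars_newline]
  exact congrArg String.ofList (pvMain _)
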